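-- pv_equiv track=rewrite | github.com/nathanrchn/llmlatex | src/formatter.py | _needs_parentheses
-- ===== SOURCE A (Python) =====
-- def _needs_parentheses(formatted_string: str) -> bool:
--     if not formatted_string:
--         return False
--
--     if formatted_string.startswith("(") and formatted_string.endswith(")"):
--         paren_count = 0
--         for i, char in enumerate(formatted_string):
--             if char == "(":
--                 paren_count += 1
--             elif char == ")":
--                 paren_count -= 1
--                 if paren_count == 0 and i < len(formatted_string) - 1:
--                     break
--         else:
--             if paren_count == 0:
--                 return False
--
--     operators = {"+", "-", "*", "/", "^", "=", "<", ">", "≤", "≥", "±"}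
--     for op in operators:
--         if op in formatted_string:
--             return True
--
--     if " " in formatted_string.strip():
--         return True
--
--     if ")/" in formatted_string or ")(" in formatted_string:
--         return True
--
--     return False
-- ===== SOURCE B (Python) =====
-- def _needs_parentheses(formatted_string: str) -> bool:
--     if not formatted_string:
--         return False
--     ops = "+-*/^=<>≤≥±"
--     depth = 0
--     first_zero = -1          # index where paren depth first returns to 0
--     has_op = False           # any operator character seen
--     pair = False             # ")/" or ")(" adjacency seen
--     inner_space = False      # a space with non-whitespace on both sides
--     seen_nonws = False
--     pending = False          # non-whitespace already seen, then a space
--     prev = ""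
--     for i, c in enumerate(formatted_string):
--         if c == "(":
--             depth += 1
--         elif c == ")":
--             depth -= 1
--             if depth == 0 and first_zero < 0:
--                 first_zero = i
--         if c in ops:
--             has_op = True
--         if prev == ")" and (c == "/" or c == "("):
--             pair = True
--         if c.isspace():
--             if c == " " and seen_nonws:
--                 pending = True
--         else:
--             seen_nonws = True
--             if pending:
--                 inner_space = True
--         prev = c
--     if formatted_string[0] == "(" and prev == ")" and first_zero == len(formatted_string) - 1:
--         return False
--     return has_op or inner_space or pair
-- ===== Notes on version B (the rewrite author's own statement) =====
-- stated objective: alternative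
-- what changed: A's four staged scans (for/else paren-depth loop, per-operator substring loop, strip-then-space check, two adjacent-pair substring checks) are fused into ONE left-to-right pass maintaining an accumulator (depth, first-zero index, operator flag, adjacency flag via the previous character, inner-space flags), combined at the end.
import Mathlib
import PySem

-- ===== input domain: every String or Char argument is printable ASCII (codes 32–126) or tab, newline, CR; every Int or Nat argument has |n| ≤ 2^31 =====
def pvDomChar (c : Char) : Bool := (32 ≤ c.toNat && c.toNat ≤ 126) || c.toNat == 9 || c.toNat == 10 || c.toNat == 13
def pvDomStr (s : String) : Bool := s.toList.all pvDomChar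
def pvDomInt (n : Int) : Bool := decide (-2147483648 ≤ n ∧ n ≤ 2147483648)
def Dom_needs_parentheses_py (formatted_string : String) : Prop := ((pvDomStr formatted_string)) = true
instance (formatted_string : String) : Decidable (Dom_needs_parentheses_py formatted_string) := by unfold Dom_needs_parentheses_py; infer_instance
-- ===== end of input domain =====

-- B fuses A's four staged scans (for/else paren loop, per-operator substring loop, strip+space check, ")/"/")(" checks) into ONE left-to-right pass over the characters with an accumulator, combined at the end (objective: alternative).


-- ===== PORT A =====
-- Python's operator set, iterated with a substring test `op in formatted_string`;
-- set iteration order cannot affect the result, listed here in literal order.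
def pvOpsA : List (List Char) := [['+'], ['-'], ['*'], ['/'], ['^'], ['='], ['<'], ['>'], ['≤'], ['≥'], ['±']]

-- A's for/else loop: true iff the loop finished WITHOUT break and paren_count == 0
def pvALoop : List Char → Nat → Nat → Int → Bool
  | [], _, _, count => count == 0
  | c :: rest, i, n, count =>
    if c = '(' then pvALoop rest (i + 1) n (count + 1)
    else if c = ')' then
      if count - 1 == 0 && decide (i < n - 1) then false
      else pvALoop rest (i + 1) n (count - 1)
    else pvALoop rest (i + 1) n count

def needs_parentheses_py (formatted_string : String) : Bool :=
  let cs := formatted_string.toList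
  if cs = [] then false
  else if (PySem.Chars.startswith cs ['('] && PySem.Chars.endswith cs [')'])
          && pvALoop cs 0 cs.length 0 then false
  else if pvOpsA.any (fun op => PySem.Chars.isIn op cs) then true
  else if PySem.Chars.isIn [' '] (PySem.Chars.strip cs) then true
  else if PySem.Chars.isIn [')', '/'] cs || PySem.Chars.isIn [')', '('] cs then true
  else false

-- ===== PORT B =====
def pvOpChars : List Char := ['+', '-', '*', '/', '^', '=', '<', '>', '≤', '≥', '±']

-- Source B's single loop; state = (depth, first_zero, has_op, pair, inner_space, seen_nonws, pending, prev);
-- returns the components used after the loop: (first_zero, has_op, pair, inner_space, prev).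
-- prev is Option Char: `none` stands for Source B's initial prev = "" (never equal to ")").
def pvBLoop : List Char → Nat → Int → Int → Bool → Bool → Bool → Bool → Bool → Option Char →
    (Int × Bool × Bool × Bool × Option Char)
  | [], _, _, fz, hasOp, pair, innerSp, _, _, prev => (fz, hasOp, pair, innerSp, prev)
  | c :: rest, i, depth, fz, hasOp, pair, innerSp, seen, pend, prev =>
    let depth' := if c = '(' then depth + 1 else if c = ')' then depth - 1 else depth
    let fz' := if c = ')' ∧ depth' = 0 ∧ fz < 0 then (i : Int) else fz
    let hasOp' := hasOp || pvOpChars.contains c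
    let pair' := pair || (prev == some ')' && (c == '/' || c == '('))
    let (seen', pend', innerSp') :=
      if PySem.Chars.isspace c then (seen, pend || (c == ' ' && seen), innerSp)
      else (true, pend, innerSp || pend)
    pvBLoop rest (i + 1) depth' fz' hasOp' pair' innerSp' seen' pend' (some c)

def needs_parentheses_py_alt (formatted_string : String) : Bool :=
  match formatted_string.toList with
  | [] => false
  | c0 :: rest =>
    let cs := c0 :: rest
    let r := pvBLoop cs 0 0 (-1) false false false false false none
    if c0 = '(' ∧ r.2.2.2.2 = some ')' ∧ r.1 = (cs.length : Int) - 1 then false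
    else r.2.1 || r.2.2.2.1 || r.2.2.1

-- ===== PRECONDITION & SPEC =====
def Spec_needs_parentheses_py (formatted_string : String) (out : Bool) : Prop := out = needs_parentheses_py_alt formatted_string
instance (formatted_string : String) (out : Bool) : Decidable (Spec_needs_parentheses_py formatted_string out) := by unfold Spec_needs_parentheses_py; infer_instance

-- ===== CLAIM (what is proved, stated in full; the proofs are below) =====
def Claim_equal_needs_parentheses_py : Prop := ∀ (formatted_string : String), Dom_needs_parentheses_py formatted_string → Spec_needs_parentheses_py formatted_string (needs_parentheses_py formatted_string)

-- ===== LEMMAS AND PROOFS =====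

-- spec helpers (proof-only)
def pvFirstZero : List Char → Int → Nat → Option Nat
  | [], _, _ => none
  | c :: rest, d, i =>
    if c = '(' then pvFirstZero rest (d + 1) (i + 1)
    else if c = ')' then
      if d - 1 = 0 then some i else pvFirstZero rest (d - 1) (i + 1)
    else pvFirstZero rest d (i + 1)

def pvHasNonWs (l : List Char) : Bool := l.any (fun c => !PySem.Chars.isspace c)

-- "some space with a non-whitespace character strictly after it"
def pvSbn : List Char → Bool
  | [] => false
  | c :: t => (c == ' ' && pvHasNonWs t) || pvSbn t

-- adjacent pair x,y somewhere in the list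
def pvAdj (x y : Char) : List Char → Bool
  | a :: b :: t => (a == x && b == y) || pvAdj x y (b :: t)
  | _ => false

-- "prev-tracking" pair detector, as Source B's loop performs it
def pvPairScan : Option Char → List Char → Bool
  | _, [] => false
  | prev, c :: rest => (prev == some ')' && (c == '/' || c == '(')) || pvPairScan (some c) rest

-- ---- projections of Source B's loop state ----
lemma pvBLoop_prev (cs : List Char) : ∀ (i : Nat) (d fz : Int) (op pr isp seen pend : Bool) (prev : Option Char),
    (pvBLoop cs i d fz op pr isp seen pend prev).2.2.2.2 = cs.getLast?.or prev := by
  induction cs with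
  | nil => intro i d fz op pr isp seen pend prev; simp [pvBLoop]
  | cons c rest ih =>
    intro i d fz op pr isp seen pend prev
    simp only [pvBLoop]
    rw [ih]
    cases rest with
    | nil => simp
    | cons b t =>
      rw [List.getLast?_cons_cons]
      cases h : (b :: t).getLast? with
      | none => simp [List.getLast?_eq_none_iff] at h
      | some x => simp [h]

lemma pvBLoop_op (cs : List Char) : ∀ (i : Nat) (d fz : Int) (op pr isp seen pend : Bool) (prev : Option Char),
    (pvBLoop cs i d fz op pr isp seen pend prev).2.1 = (op || cs.any (fun c => pvOpChars.contains c)) := by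
  induction cs with
  | nil => intro i d fz op pr isp seen pend prev; simp [pvBLoop]
  | cons c rest ih =>
    intro i d fz op pr isp seen pend prev
    simp only [pvBLoop]
    rw [ih]
    simp [Bool.or_assoc]

lemma pvBLoop_pair (cs : List Char) : ∀ (i : Nat) (d fz : Int) (op pr isp seen pend : Bool) (prev : Option Char),
    (pvBLoop cs i d fz op pr isp seen pend prev).2.2.1 = (pr || pvPairScan prev cs) := by
  induction cs with
  | nil => intro i d fz op pr isp seen pend prev; simp [pvBLoop, pvPairScan]
  | cons c rest ih =>
    intro i d fz op pr isp seen pend prev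
    simp only [pvBLoop, pvPairScan]
    rw [ih]
    simp [Bool.or_assoc]

lemma pvBLoop_fz (cs : List Char) : ∀ (i : Nat) (d fz : Int) (op pr isp seen pend : Bool) (prev : Option Char),
    fz = -1 ∨ 0 ≤ fz →
    (pvBLoop cs i d fz op pr isp seen pend prev).1
      = if 0 ≤ fz then fz else (pvFirstZero cs d i).elim (-1) (fun j => (j : Int)) := by
  induction cs with
  | nil =>
    intro i d fz op pr isp seen pend prev h
    rcases h with rfl | h <;> simp [pvBLoop, pvFirstZero] <;> omega
  | cons c rest ih =>
    intro i d fz op pr isp seen pend prev h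
    simp only [pvBLoop]
    by_cases hc : (c = ')' ∧ (if c = '(' then d + 1 else if c = ')' then d - 1 else d) = 0 ∧ fz < 0)
    · rw [if_pos hc, ih _ _ _ _ _ _ _ _ _ (Or.inr (Int.natCast_nonneg i))]
      obtain ⟨hc1, hc2, hc3⟩ := hc
      have hne : ¬ c = '(' := by rw [hc1]; decide
      rw [if_neg hne, if_pos hc1] at hc2
      simp only [pvFirstZero, if_neg hne, if_pos hc1, if_pos hc2]
      simp
      omega
    · rw [if_neg hc, ih _ _ _ _ _ _ _ _ _ h]
      by_cases hge : 0 ≤ fz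
      · simp [hge]
      · have hlt : fz < 0 := by omega
        simp only [if_neg hge]
        have hrec : pvFirstZero (c :: rest) d i
            = pvFirstZero rest (if c = '(' then d + 1 else if c = ')' then d - 1 else d) (i + 1) := by
          by_cases h1 : c = '('
          · simp [pvFirstZero, h1]
          · by_cases h2 : c = ')'
            · have h3 : ¬ d - 1 = 0 := by
                intro h3
                exact hc ⟨h2, by simp [h2, h3], hlt⟩
              simp [pvFirstZero, h2, h3]
            · simp [pvFirstZero, h1, h2]
        rw [hrec]
lemma pvBLoop_isp (cs : List Char) : ∀ (i : Nat) (d fz : Int) (op pr isp seen pend : Bool) (prev : Option Char),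
    (pvBLoop cs i d fz op pr isp seen pend prev).2.2.2.1
      = (isp || (pend && pvHasNonWs cs)
          || pvSbn (if seen then cs else cs.dropWhile PySem.Chars.isspace)) := by
  induction cs with
  | nil => intro i d fz op pr isp seen pend prev; cases seen <;> simp [pvBLoop, pvHasNonWs, pvSbn]
  | cons c rest ih =>
    intro i d fz op pr isp seen pend prev
    simp only [pvBLoop]
    by_cases hws : PySem.Chars.isspace c
    · simp only [if_pos hws]
      rw [ih]
      have hns : c ≠ ' ' ∨ c = ' ' := (em (c = ' ')).symm
      by_cases hsp : c = ' '
      · subst hsp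
        cases seen <;> cases pend <;>
          simp [pvSbn, pvHasNonWs, hws, Bool.or_assoc]
      · have : (c == ' ') = false := by simp [hsp]
        cases seen <;> cases pend <;>
          simp [pvSbn, pvHasNonWs, hws, this, Bool.or_assoc]
    · simp only [if_neg hws]
      rw [ih]
      have hsp : c ≠ ' ' := by rintro rfl; exact hws (by decide)
      have hcs : (c == ' ') = false := by simp [hsp]
      cases seen <;> cases pend <;>
        simp [pvSbn, pvHasNonWs, hws, hcs]

-- ---- connecting the accumulator components to A's staged scans ----
lemma isIn_singleton (c : Char) (cs : List Char) :
    PySem.Chars.isIn [c] cs = cs.contains c := by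
  rcases h : cs.contains c with _ | _
  · rw [PySem.Chars.isIn_eq_false_iff]
    intro hinf
    have : c ∈ cs := hinf.mem (by simp)
    simp at h
    exact h this
  · rw [PySem.Chars.isIn_iff_infix]
    rcases List.mem_iff_append.mp (by simpa using h) with ⟨l, r, rfl⟩
    exact ⟨l, r, by simp⟩

lemma any_contains_comm (l m : List Char) : l.any m.contains = m.any l.contains := by
  rw [Bool.eq_iff_iff]
  simp only [List.any_eq_true, List.contains_iff_mem]
  exact ⟨fun ⟨x, h1, h2⟩ => ⟨x, h2, h1⟩, fun ⟨x, h1, h2⟩ => ⟨x, h2, h1⟩⟩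

lemma ops_eq (cs : List Char) :
    pvOpsA.any (fun op => PySem.Chars.isIn op cs)
      = cs.any (fun ch => pvOpChars.contains ch) := by
  have h1 : pvOpsA = pvOpChars.map (fun c => [c]) := rfl
  rw [h1, List.any_map]
  have h3 : pvOpChars.any ((fun op => PySem.Chars.isIn op cs) ∘ fun c => [c])
      = pvOpChars.any cs.contains :=
    List.any_congr rfl (fun c => isIn_singleton c cs)
  rw [h3]
  exact any_contains_comm pvOpChars cs

lemma pvALoop_eq_firstZero (n : Nat) :
    ∀ (cs : List Char) (i : Nat) (count : Int), 0 < count → i + cs.length = n →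
      pvALoop cs i n count = (pvFirstZero cs count i == some (n - 1)) := by
  intro cs
  induction cs with
  | nil =>
    intro i count hc hn
    simp [pvALoop, pvFirstZero]
    omega
  | cons c rest ih =>
    intro i count hc hn
    simp only [pvALoop, pvFirstZero]
    by_cases h1 : c = '('
    · simp only [h1, if_pos]
      exact ih (i + 1) (count + 1) (by omega) (by simp at hn ⊢; omega)
    · simp only [if_neg h1]
      by_cases h2 : c = ')'
      · simp only [h2]
        by_cases h3 : count - 1 = 0
        · by_cases h4 : i < n - 1
          · simp [h3, h4]
            exact Nat.ne_of_lt h4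
          · have hlen : rest.length = 0 := by simp at hn; omega
            have hrest : rest = [] := List.length_eq_zero_iff.mp hlen
            subst hrest
            have hi : i = n - 1 := by simp at hn; omega
            simp [h3, pvALoop, hi]
        · have h4 : (count - 1 == 0 && decide (i < n - 1)) = false := by simp [h3]
          simp only [h4, Bool.false_eq_true, if_neg, if_neg h3, not_false_eq_true]
          exact ih (i + 1) (count - 1) (by omega) (by simp at hn ⊢; omega)
      · simp only [if_neg h2]
        exact ih (i + 1) count hc (by simp at hn ⊢; omega)

lemma startswith_singleton (c a : Char) (rest : List Char) :
    PySem.Chars.startswith (a :: rest) [c] = decide (a = c) := by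
  rcases h : decide (a = c) with _ | _
  · simp only [decide_eq_false_iff_not] at h
    rw [Bool.eq_false_iff]
    intro hs
    rcases (PySem.Chars.startswith_iff _ _).mp hs with ⟨t, ht⟩
    simp at ht
    exact h ht.1.symm
  · simp only [decide_eq_true_eq] at h
    subst h
    exact (PySem.Chars.startswith_iff _ _).mpr ⟨rest, rfl⟩

lemma endswith_singleton (c a : Char) (rest : List Char) :
    PySem.Chars.endswith (a :: rest) [c] = ((a :: rest).getLast? == some c) := by
  rcases h : (a :: rest).getLast? == some c with _ | _
  · rw [Bool.eq_false_iff]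
    intro hs
    rcases (PySem.Chars.endswith_iff _ _).mp hs with ⟨t, ht⟩
    have hg : (a :: rest).getLast? = some c := by
      rw [← ht, List.getLast?_append]
      simp
    simp [hg] at h
  · simp only [beq_iff_eq] at h
    rw [PySem.Chars.endswith_iff]
    rcases List.getLast?_eq_some_iff.mp h with ⟨l, hl⟩
    exact ⟨l, hl.symm⟩

-- ---- the ")/" / ")(" adjacency scan vs the substring tests ----
lemma isIn_pair (x y : Char) (cs : List Char) : PySem.Chars.isIn [x, y] cs = pvAdj x y cs := by
  induction cs with
  | nil =>
    rw [Bool.eq_iff_iff, PySem.Chars.isIn_iff_infix]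
    simp [pvAdj]
  | cons a t ih =>
    cases t with
    | nil =>
      rw [Bool.eq_iff_iff, PySem.Chars.isIn_iff_infix]
      constructor
      · intro hinf
        have := hinf.length_le
        simp at this
      · intro h
        simp [pvAdj] at h
    | cons b t' =>
      rw [Bool.eq_iff_iff, PySem.Chars.isIn_iff_infix, List.infix_cons_iff]
      rw [show pvAdj x y (a :: b :: t') = ((a == x && b == y) || pvAdj x y (b :: t')) from rfl]
      rw [← ih, Bool.or_eq_true, Bool.and_eq_true]
      rw [PySem.Chars.isIn_iff_infix]
      constructor
      · rintro (hpre | hinf)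
        · obtain ⟨hx, hy⟩ := List.cons_prefix_cons.mp hpre
          obtain ⟨hy', -⟩ := List.cons_prefix_cons.mp hy
          exact Or.inl ⟨by simp [hx], by simp [hy']⟩
        · exact Or.inr hinf
      · rintro (⟨hx, hy⟩ | hinf)
        · rw [beq_iff_eq] at hx hy
          subst hx; subst hy
          exact Or.inl ⟨t', by simp⟩
        · exact Or.inr hinf

lemma pairScan_some (cs : List Char) : ∀ (p : Char),
    pvPairScan (some p) cs = (pvAdj ')' '/' (p :: cs) || pvAdj ')' '(' (p :: cs)) := by
  induction cs with
  | nil => intro p; simp [pvPairScan, pvAdj]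
  | cons c t ih =>
    intro p
    rw [show pvPairScan (some p) (c :: t)
        = ((some p == some ')' && (c == '/' || c == '(')) || pvPairScan (some c) t) from rfl]
    rw [ih c]
    rw [show pvAdj ')' '/' (p :: c :: t) = ((p == ')' && c == '/') || pvAdj ')' '/' (c :: t)) from rfl]
    rw [show pvAdj ')' '(' (p :: c :: t) = ((p == ')' && c == '(') || pvAdj ')' '(' (c :: t)) from rfl]
    rcases h1 : p == ')' with _ | _ <;> rcases h2 : c == '/' with _ | _ <;>
      rcases h3 : c == '(' with _ | _ <;>
        simp [h1, h2, h3, Bool.or_comm]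

lemma pairScan_none (cs : List Char) :
    pvPairScan none cs = (pvAdj ')' '/' cs || pvAdj ')' '(' cs) := by
  cases cs with
  | nil => simp [pvPairScan, pvAdj]
  | cons c t =>
    rw [show pvPairScan none (c :: t)
        = ((none == some ')' && (c == '/' || c == '(')) || pvPairScan (some c) t) from rfl]
    rw [pairScan_some t c]
    simp

-- ---- the inner-space flag vs " " in s.strip() ----
lemma sbn_of_no_nonws (l : List Char) (h : pvHasNonWs l = false) : pvSbn l = false := by
  induction l with
  | nil => rfl
  | cons c t ih =>
    simp only [pvHasNonWs, List.any_cons, Bool.or_eq_false_iff] at h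
    have ht : pvSbn t = false := ih (by simp [pvHasNonWs, h.2])
    have hw : pvHasNonWs t = false := by simp [pvHasNonWs, h.2]
    simp [pvSbn, ht, hw]

lemma rstrip_contains (l : List Char) : (PySem.Chars.rstrip l).contains ' ' = pvSbn l := by
  induction l with
  | nil => rfl
  | cons c t ih =>
    rw [show PySem.Chars.rstrip (c :: t)
        = (List.dropWhile PySem.Chars.isspace (c :: t).reverse).reverse from rfl]
    rw [List.reverse_cons, List.dropWhile_append]
    by_cases hnw : pvHasNonWs t = true
    · have hne : ¬ (t.reverse.dropWhile PySem.Chars.isspace).isEmpty = true := by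
        simp only [List.isEmpty_iff, List.dropWhile_eq_nil_iff, List.mem_reverse]
        simp only [pvHasNonWs, List.any_eq_true, Bool.not_eq_eq_eq_not, Bool.not_true] at hnw
        rcases hnw with ⟨x, hx, hxw⟩
        intro hall
        rw [hall x hx] at hxw
        exact absurd hxw (by simp)
      rw [if_neg hne]
      have hmem : ((t.reverse.dropWhile PySem.Chars.isspace ++ [c]).reverse).contains ' '
          = ((c == ' ') || (t.reverse.dropWhile PySem.Chars.isspace).reverse.contains ' ') := by
        rw [Bool.eq_iff_iff]
        simp only [List.contains_iff_mem, List.mem_reverse, List.mem_append,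
          List.mem_singleton, Bool.or_eq_true, beq_iff_eq]
        constructor
        · rintro (h | h)
          exacts [Or.inr h, Or.inl h.symm]
        · rintro (h | h)
          exacts [Or.inr h.symm, Or.inl h]
      rw [hmem]
      rw [show (t.reverse.dropWhile PySem.Chars.isspace).reverse = PySem.Chars.rstrip t from rfl]
      rw [ih]
      simp [pvSbn, hnw]
    · have hemp : (t.reverse.dropWhile PySem.Chars.isspace).isEmpty = true := by
        simp only [List.isEmpty_iff, List.dropWhile_eq_nil_iff, List.mem_reverse]
        intro x hx
        by_contra hxw
        exact hnw (by simp [pvHasNonWs, List.any_eq_true]; exact ⟨x, hx, by simpa using hxw⟩)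
      rw [if_pos hemp]
      have hsbn : pvSbn t = false := sbn_of_no_nonws t (by simpa using hnw)
      by_cases hws : PySem.Chars.isspace c
      · rw [List.dropWhile_cons_of_pos (by simpa using hws)]
        have hw : pvHasNonWs t = false := by simpa using hnw
        simp [pvSbn, hsbn, hw]
      · rw [List.dropWhile_cons_of_neg (by simpa using hws)]
        have hw : pvHasNonWs t = false := by simpa using hnw
        have hc : ¬ c = ' ' := by rintro rfl; exact hws (by decide)
        simp [pvSbn, hsbn, hw]
        exact fun h => hc h.symm

lemma space_in_strip (cs : List Char) :
    PySem.Chars.isIn [' '] (PySem.Chars.strip cs)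
      = pvSbn (cs.dropWhile PySem.Chars.isspace) := by
  rw [isIn_singleton]
  exact rstrip_contains (cs.dropWhile PySem.Chars.isspace)

theorem main_eq (s : String) : needs_parentheses_py s = needs_parentheses_py_alt s := by
  rcases hcs : s.toList with _ | ⟨c, rest⟩ <;>
    simp only [needs_parentheses_py, needs_parentheses_py_alt, hcs]
  · rfl
  · simp only [List.cons_ne_nil, if_neg, not_false_eq_true]
    have hprev : (pvBLoop (c :: rest) 0 0 (-1) false false false false false none).2.2.2.2
        = (c :: rest).getLast? := by
      rw [pvBLoop_prev]; simp
    have hop : (pvBLoop (c :: rest) 0 0 (-1) false false false false false none).2.1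
        = (c :: rest).any (fun ch => pvOpChars.contains ch) := by
      rw [pvBLoop_op]; simp
    have hpr : (pvBLoop (c :: rest) 0 0 (-1) false false false false false none).2.2.1
        = pvPairScan none (c :: rest) := by
      rw [pvBLoop_pair]; simp
    have hisp : (pvBLoop (c :: rest) 0 0 (-1) false false false false false none).2.2.2.1
        = pvSbn ((c :: rest).dropWhile PySem.Chars.isspace) := by
      rw [pvBLoop_isp]; simp
    have hfz : (pvBLoop (c :: rest) 0 0 (-1) false false false false false none).1
        = (pvFirstZero (c :: rest) 0 0).elim (-1) (fun j => (j : Int)) := by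
      rw [pvBLoop_fz _ _ _ _ _ _ _ _ _ _ (Or.inl rfl)]
      simp
    rw [hprev, hop, hpr, hisp, hfz, startswith_singleton, endswith_singleton]
    have hfziff : ((pvFirstZero (c :: rest) 0 0).elim (-1 : Int) (fun j => (j : Int))
          = (rest.length : Int))
        ↔ pvFirstZero (c :: rest) 0 0 = some rest.length := by
      cases hz : pvFirstZero (c :: rest) 0 0 with
      | none =>
        simp only [Option.elim]
        constructor
        · intro h; exfalso; omega
        · intro h; cases h
      | some j =>
        simp only [Option.elim, Option.some.injEq]
        constructor <;> intro h <;> omega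
    have hwrap :
        ((decide (c = '(') && ((c :: rest).getLast? == some ')'))
            && pvALoop (c :: rest) 0 (c :: rest).length 0)
          = decide (c = '(' ∧ (c :: rest).getLast? = some ')'
              ∧ (pvFirstZero (c :: rest) 0 0).elim (-1 : Int) (fun j => (j : Int))
                  = ((c :: rest).length : Int) - 1) := by
      by_cases h1 : c = '('
      · subst h1
        have hstep : pvALoop ('(' :: rest) 0 ('(' :: rest).length 0
            = (pvFirstZero ('(' :: rest) 0 0 == some (('(' :: rest).length - 1)) := by
          simp only [pvALoop, pvFirstZero]
          exact pvALoop_eq_firstZero (('(' :: rest).length) rest 1 1 (by omega) (by simp; omega)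
        rw [show ('(' :: rest).length - 1 = rest.length from by simp] at hstep
        rw [hstep]
        rcases h2 : ((('(' :: rest).getLast? == some ')')) with _ | _
        · simp [beq_eq_false_iff_ne.mp h2]
        · rcases h3 : pvFirstZero ('(' :: rest) 0 0 == some rest.length with _ | _
          · have h3' := beq_eq_false_iff_ne.mp h3
            simp [beq_iff_eq.mp h2]
            rw [hfziff]
            exact h3'
          · simp [beq_iff_eq.mp h2]
            rw [hfziff]
            exact beq_iff_eq.mp h3
      · simp [h1]
    rw [hwrap]
    by_cases hw : c = '(' ∧ (c :: rest).getLast? = some ')'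
        ∧ (pvFirstZero (c :: rest) 0 0).elim (-1 : Int) (fun j => (j : Int))
            = ((c :: rest).length : Int) - 1
    · rw [decide_eq_true hw, if_pos rfl, if_pos hw]
    · simp only [hw, decide_false, Bool.false_eq_true, if_neg, not_false_eq_true, if_neg hw]
      rw [ops_eq, space_in_strip, pairScan_none, isIn_pair, isIn_pair]
      rcases (c :: rest).any (fun ch => pvOpChars.contains ch) <;>
        rcases pvSbn ((c :: rest).dropWhile PySem.Chars.isspace) <;>
          rcases pvAdj ')' '/' (c :: rest) <;>
            rcases pvAdj ')' '(' (c :: rest) <;> simp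

-- ===== VERDICT (by name: the statement is the Claim_ definition above) =====
theorem needs_parentheses_py_spec : Claim_equal_needs_parentheses_py := by
  intro s _
  unfold Spec_needs_parentheses_py
  exact main_eq s
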